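-- pv_equiv track=rewrite | github.com/anuu0916/algorithm | programmers/92334.py | solution
-- ===== SOURCE A (Python) =====
-- def solution(id_list, report, k):
--     answer = []
--     dic = {}
--     email = {}
--
--     for i in id_list:
--         dic[i] = set([])
--         email[i] = 0
--
--     for r in report:
--         reporter, reported = r.split()
--         dic[reported].add(reporter)
--
--     for d in dic:
--         if len(dic[d]) >= k:
--             for i in dic[d]:
--                 email[i] += 1
--
--     for e in email:
--         answer.append(email[e])
--
--     return answer
-- ===== SOURCE B (Python) =====
-- def solution(id_list, report, k):
--     # Deduplicate reports into distinct (reporter, reported) pairs, then two flat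
--     # counting passes: how many distinct reporters each user has, then the mails.
--     pairs = {tuple(r.split()) for r in report}
--     cnt = {i: 0 for i in id_list}
--     for _, b in pairs:
--         cnt[b] += 1
--     email = {i: 0 for i in id_list}
--     for a, b in pairs:
--         if cnt[b] >= k:
--             email[a] += 1
--     return list(email.values())
-- ===== Notes on version B (the rewrite author's own statement) =====
-- stated objective: alternative
-- what changed: Replaces A's per-user dict of reporter sets and its nested loop over that dict with a flat deduplicated (reporter, reported) pair set consumed by two independent counting passes (distinct-reporter counts, then mail counts).
import Mathlib
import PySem

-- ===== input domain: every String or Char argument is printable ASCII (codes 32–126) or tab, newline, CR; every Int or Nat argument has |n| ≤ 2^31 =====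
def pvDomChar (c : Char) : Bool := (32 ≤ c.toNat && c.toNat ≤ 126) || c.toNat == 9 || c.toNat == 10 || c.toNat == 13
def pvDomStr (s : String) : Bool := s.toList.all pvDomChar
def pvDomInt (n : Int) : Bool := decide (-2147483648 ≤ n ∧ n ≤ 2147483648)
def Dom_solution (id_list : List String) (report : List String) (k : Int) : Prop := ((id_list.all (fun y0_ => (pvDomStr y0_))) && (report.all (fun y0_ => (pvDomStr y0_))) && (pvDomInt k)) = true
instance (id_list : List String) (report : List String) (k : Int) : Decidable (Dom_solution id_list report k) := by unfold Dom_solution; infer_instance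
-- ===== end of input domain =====

-- B replaces A's per-user dict of reporter sets (and its nested loop) by a flat deduplicated
-- (reporter, reported) pair set consumed by two independent counting passes; same asymptotic cost
-- ("alternative" objective, no speed claim).

-- ===== PORT A =====
def solution (id_list : List String) (report : List String) (k : Int) : List Int :=
  let answer : List Int := []
  let st := id_list.foldl
    (fun (st : PySem.Dict String (PySem.Set String) × PySem.Dict String Int) i =>
      (st.1.insert i PySem.Set.empty, st.2.insert i 0))
    (PySem.Dict.empty, PySem.Dict.empty)
  let dic := report.foldl
    (fun dic r =>
      match PySem.Str.split₀ r with
      | [reporter, reported] => dic.modify reported PySem.Set.empty (fun s => s.add reporter)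
      | _ => dic)   -- 'reporter, reported = r.split()' raises unless exactly 2 tokens; Pre_ excludes
    st.1
  -- 'dic[reported]' raises KeyError when reported ∉ id_list; Pre_ excludes (modify would insert)
  let email := dic.keys.foldl
    (fun email d =>
      if k ≤ PySem.Set.len (dic.getD d PySem.Set.empty) then
        -- 'email[i] += 1' raises KeyError when i ∉ id_list; Pre_ excludes
        (dic.getD d PySem.Set.empty).foldl (fun email i => email.modify i 0 (· + 1)) email
      else email)
    st.2
  email.keys.foldl (fun answer e => answer ++ [email.getD e 0]) answer

-- ===== PORT B =====
def solution_alt (id_list : List String) (report : List String) (k : Int) : List Int :=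
  let pairs : PySem.Set (List String) := PySem.Set.ofList (report.map PySem.Str.split₀)
  let cnt0 := id_list.foldl (fun (d : PySem.Dict String Int) i => d.insert i 0) PySem.Dict.empty
  let cnt := pairs.foldl
    (fun cnt t => match t with
      | _ :: rest =>                       -- 'for a, b in pairs' raises on a non-pair; Pre_ excludes
        (match rest with
          | b :: rest2 =>
            (match rest2 with
              | [] => cnt.modify b 0 (· + 1)   -- 'cnt[b] += 1' raises KeyError when b ∉ id_list; Pre_ excludes
              | _ :: _ => cnt)
          | [] => cnt)
      | [] => cnt)
    cnt0
  let email0 := id_list.foldl (fun (d : PySem.Dict String Int) i => d.insert i 0) PySem.Dict.empty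
  let email := pairs.foldl
    (fun email t => match t with
      | a :: rest =>
        (match rest with
          | b :: rest2 =>
            (match rest2 with
              | [] => if k ≤ cnt.getD b 0 then email.modify a 0 (· + 1) else email
              | _ :: _ => email)
          | [] => email)
      | [] => email)
    email0
  email.values

-- ===== PRECONDITION & SPEC =====
-- number of DISTINCT reporters of user b (distinct (reporter, b) pairs among the reports)
def pvNumRep (report : List String) (b : String) : Int :=
  (((PySem.List.dedup (report.map PySem.Str.split₀))).filter (fun t => t.getD 1 "" == b)).length

-- Exactly the inputs on which the Python A returns normally: every report splits into exactly two
-- tokens (else unpacking raises ValueError), the reported id is in id_list (else dic[reported]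
-- raises KeyError), and whenever the reported id's distinct-reporter count reaches k the reporter
-- is in id_list too (else email[reporter] += 1 raises KeyError).
def Pre_solution (id_list : List String) (report : List String) (k : Int) : Prop :=
  ∀ r ∈ report, (PySem.Str.split₀ r).length = 2 ∧
    (PySem.Str.split₀ r).getD 1 "" ∈ id_list ∧
    (k ≤ pvNumRep report ((PySem.Str.split₀ r).getD 1 "") → (PySem.Str.split₀ r).getD 0 "" ∈ id_list)
instance (id_list : List String) (report : List String) (k : Int) : Decidable (Pre_solution id_list report k) := by unfold Pre_solution; infer_instance

def pvWitness_solution : List String × List String × Int := (["muzi", "frodo"], ["muzi frodo"], 1)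

def Spec_solution (id_list : List String) (report : List String) (k : Int) (out : List Int) : Prop := out = solution_alt id_list report k
instance (id_list : List String) (report : List String) (k : Int) (out : List Int) : Decidable (Spec_solution id_list report k out) := by unfold Spec_solution; infer_instance

-- ===== CLAIM (what is proved, stated in full; the proofs are below) =====
def Claim_equal_solution : Prop := ∀ (id_list : List String) (report : List String) (k : Int), Dom_solution id_list report k → Pre_solution id_list report k → Spec_solution id_list report k (solution id_list report k)

-- ===== LEMMAS AND PROOFS =====

-- abbreviations used only by the proofs
def pvG (d : String) (t : List String) : Option String :=
  match t with | [a, b] => if b == d then some a else none | _ => none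
def pvReps (report : List String) (d : String) : List String :=
  (report.map PySem.Str.split₀).filterMap (pvG d)
def pvPairsT (report : List String) : List (List String) :=
  PySem.List.dedup (report.map PySem.Str.split₀)
def pvSA (report : List String) (d : String) : List String :=
  PySem.Set.ofList (pvReps report d)
def pvFd (report : List String) (d : String) : List (List String) :=
  (pvPairsT report).filter (fun t => t.getD 1 "" == d)
def pvSndOpt (t : List String) : Option String :=
  match t with | [_, b] => some b | _ => none
def pvFB (k : Int) (cnt : PySem.Dict String Int) (t : List String) : Option String :=
  match t with | [a, b] => if k ≤ cnt.getD b 0 then some a else none | _ => none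

-- init-dict lemmas
lemma pv_getD_fold_insert_zero (l : List String) (dc : PySem.Dict String Int) (j : String)
    (h : dc.getD j 0 = 0) :
    (l.foldl (fun e i => e.insert i 0) dc).getD j 0 = 0 := by
  induction l generalizing dc with
  | nil => exact h
  | cons x xs ih =>
    simp only [List.foldl_cons]
    exact ih _ (by rw [PySem.Dict.getD_insert]; split <;> first | rfl | exact h)

lemma pv_getD_fold_insert_empty (l : List String) (dc : PySem.Dict String (PySem.Set String)) (j : String)
    (h : dc.getD j PySem.Set.empty = PySem.Set.empty) :
    (l.foldl (fun e i => e.insert i PySem.Set.empty) dc).getD j PySem.Set.empty = PySem.Set.empty := by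
  induction l generalizing dc with
  | nil => exact h
  | cons x xs ih =>
    simp only [List.foldl_cons]
    exact ih _ (by rw [PySem.Dict.getD_insert]; split <;> first | rfl | exact h)

lemma pv_keys_fold_insert {ν : Type} (l : List String) (c : ν) :
    (l.foldl (fun (e : PySem.Dict String ν) i => e.insert i c) PySem.Dict.empty).keys
      = PySem.List.dedup l := by
  rw [show (fun (e : PySem.Dict String ν) i => e.insert i c)
        = (fun (e : PySem.Dict String ν) i => e.insert i ((fun (_ : PySem.Dict String ν) (_ : String) => c) e i)) from rfl,
      PySem.Dict.keys_foldl_insert, PySem.Dict.keys_empty, PySem.Set.update_nil_left,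
      PySem.List.dedup_eq_ofList]

-- Set.update of members is the identity
lemma pv_update_subset (xs : List String) : ∀ (s : PySem.Set String), (∀ x ∈ xs, x ∈ s) →
    PySem.Set.update s xs = s := by
  induction xs with
  | nil => intro s _; rfl
  | cons x xs ih =>
    intro s h
    have hx : x ∈ s := h x (by simp)
    have hadd : s.add x = s := by simp [PySem.Set.add, PySem.Set.contains, hx]
    rw [show PySem.Set.update s (x :: xs) = PySem.Set.update (s.add x) xs from rfl, hadd]
    exact ih s (fun y hy => h y (by simp [hy]))

-- characterisation of A's dic after the report loop
lemma pv_dic_getD (d : String) (rs : List String) :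
    ∀ (dic : PySem.Dict String (PySem.Set String)),
    (rs.foldl (fun dic r =>
      match PySem.Str.split₀ r with
      | [reporter, reported] => dic.modify reported PySem.Set.empty (fun s => s.add reporter)
      | _ => dic) dic).getD d PySem.Set.empty
    = PySem.Set.update (dic.getD d PySem.Set.empty) (pvReps rs d) := by
  induction rs with
  | nil => intro dic; rfl
  | cons r rs ih =>
    intro dic
    simp only [List.foldl_cons]
    rcases hsp : PySem.Str.split₀ r with _ | ⟨a, _ | ⟨b, _ | ⟨c, tl⟩⟩⟩ <;>
      simp only [hsp, pvReps, List.map_cons, List.filterMap_cons, pvG] <;>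
      try exact ih dic
    by_cases hbd : b = d
    · subst hbd
      simp only [BEq.rfl]
      rw [ih, PySem.Dict.getD_modify_self]
      rfl
    · have : (b == d) = false := by simp [hbd]
      simp only [this]
      rw [ih, PySem.Dict.getD_modify_of_ne _ _ _ (fun h => hbd h.symm)]
      exact ih dic ▸ rfl

-- A's report loop keeps the key list when all reported ids are already keys
lemma pv_keys_fold_stepA (rs : List String) :
    ∀ (dic : PySem.Dict String (PySem.Set String)),
    (∀ r ∈ rs, ∃ a b, PySem.Str.split₀ r = [a, b] ∧ b ∈ dic.keys) →
    (rs.foldl (fun dic r =>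
      match PySem.Str.split₀ r with
      | [reporter, reported] => dic.modify reported PySem.Set.empty (fun s => s.add reporter)
      | _ => dic) dic).keys = dic.keys := by
  induction rs with
  | nil => intro dic _; rfl
  | cons r rs ih =>
    intro dic h
    obtain ⟨a, b, hsp, hb⟩ := h r (by simp)
    simp only [List.foldl_cons, hsp]
    have hk : (dic.modify b PySem.Set.empty (fun s => s.add a)).keys = dic.keys := by
      rw [PySem.Dict.keys_modify, PySem.Dict.keys_insert_of_contains]
      exact (PySem.Dict.contains_iff_mem_keys dic b).mpr hb
    rw [ih _ (fun r' hr' => ?_), hk]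
    obtain ⟨a', b', hsp', hb'⟩ := h r' (by simp [hr'])
    exact ⟨a', b', hsp', hk ▸ hb'⟩

-- a guarded nested loop is a fold over the flatMap of the filtered outer list
lemma pv_fold_if_flat {κ α σ : Type} (L : κ → List α) (P : κ → Prop) [DecidablePred P]
    (f : σ → α → σ) (ds : List κ) : ∀ (e : σ),
    ds.foldl (fun e d => if P d then (L d).foldl f e else e) e
      = ((ds.filter (fun d => decide (P d))).flatMap L).foldl f e := by
  induction ds with
  | nil => intro e; rfl
  | cons d ds ih =>
    intro e
    by_cases h : P d <;>
      simp [h, List.foldl_append, ih]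

-- B's cnt loop as a fold over the extracted reported ids
lemma pv_cnt_fold_eq (l : List (List String)) : ∀ (e : PySem.Dict String Int),
    l.foldl (fun cnt t => match t with
      | _ :: rest =>
        (match rest with
          | b :: rest2 =>
            (match rest2 with
              | [] => cnt.modify b 0 (· + 1)
              | _ :: _ => cnt)
          | [] => cnt)
      | [] => cnt) e
    = (l.filterMap pvSndOpt).foldl (fun cnt b => cnt.modify b 0 (· + 1)) e := by
  induction l with
  | nil => intro e; rfl
  | cons t l ih =>
    intro e
    rcases t with _ | ⟨a, _ | ⟨b, _ | ⟨c, tl⟩⟩⟩ <;>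
      simp only [List.foldl_cons, List.filterMap_cons, pvSndOpt] <;> exact ih _

-- B's email loop as a fold over the chosen reporters
lemma pv_email_fold_eq (k : Int) (cnt : PySem.Dict String Int) (l : List (List String)) :
    ∀ (e : PySem.Dict String Int),
    l.foldl (fun email t => match t with
      | a :: rest =>
        (match rest with
          | b :: rest2 =>
            (match rest2 with
              | [] => if k ≤ cnt.getD b 0 then email.modify a 0 (· + 1) else email
              | _ :: _ => email)
          | [] => email)
      | [] => email) e
    = (l.filterMap (pvFB k cnt)).foldl (fun email a => email.modify a 0 (· + 1)) e := by
  induction l with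
  | nil => intro e; rfl
  | cons t l ih =>
    intro e
    rcases t with _ | ⟨a, _ | ⟨b, _ | ⟨c, tl⟩⟩⟩
    · simp only [List.foldl_cons, List.filterMap_cons, pvFB]; exact ih _
    · simp only [List.foldl_cons, List.filterMap_cons, pvFB]; exact ih _
    · have hfb : pvFB k cnt [a, b] = if k ≤ cnt.getD b 0 then some a else none := rfl
      simp only [List.foldl_cons, List.filterMap_cons, hfb]
      by_cases hc : k ≤ cnt.getD b 0
      · simp only [hc, if_true]; exact ih _
      · simp only [hc, if_false]; exact ih _
    · simp only [List.foldl_cons, List.filterMap_cons, pvFB]; exact ih _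

lemma pv_keys_fold_modify_one (l : List String) (d : PySem.Dict String Int) :
    (l.foldl (fun e a => e.modify a 0 (· + 1)) d).keys = PySem.Set.update d.keys l := by
  rw [show (fun (e : PySem.Dict String Int) a => e.modify a 0 (· + 1))
        = (fun (e : PySem.Dict String Int) a =>
            e.modify a 0 ((fun (_ : PySem.Dict String Int) (_ : String) => (· + (1:Int))) e a)) from rfl,
      PySem.Dict.keys_foldl_modify]

-- counting over flatMap / filter
lemma pv_count_flatMap {κ : Type} (j : String) (L : κ → List String) (ds : List κ) :
    ((ds.flatMap L).count j) = (ds.map (fun d => (L d).count j)).sum := by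
  induction ds with
  | nil => rfl
  | cons d ds ih => simp [List.flatMap_cons, List.count_append, ih]

lemma pv_countP_flatMap {κ α : Type} (p : α → Bool) (F : κ → List α) (ds : List κ) :
    ((ds.flatMap F).countP p) = (ds.map (fun d => (F d).countP p)).sum := by
  induction ds with
  | nil => rfl
  | cons d ds ih => simp [List.flatMap_cons, List.countP_append, ih]

lemma pv_sum_map_filter {κ : Type} (p : κ → Bool) (h : κ → Nat) (ds : List κ) :
    (((ds.filter p).map h).sum) = (ds.map (fun d => if p d then h d else 0)).sum := by
  induction ds with
  | nil => rfl
  | cons d ds ih => by_cases hp : p d <;> simp [hp, ih]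

-- grouping a list by a key function over a nodup key list is a permutation
lemma pv_shrink {α κ : Type} [DecidableEq κ] (key : α → κ) (l : List α) (d : κ) :
    ∀ (ks : List κ), d ∉ ks →
    ks.flatMap (fun d' => (l.filter (fun t => !(key t == d))).filter (fun t => key t == d'))
      = ks.flatMap (fun d' => l.filter (fun t => key t == d')) := by
  intro ks
  induction ks with
  | nil => intro _; rfl
  | cons d' ks ih =>
    intro hd
    have hne : d' ≠ d := fun h => hd (h ▸ by simp)
    have hdk : d ∉ ks := fun h => hd (by simp [h])
    simp only [List.flatMap_cons, ih hdk]
    congr 1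
    rw [List.filter_filter]
    exact List.filter_congr (fun t _ => by by_cases h : key t = d' <;> simp [h, hne])

lemma pv_perm_group {α κ : Type} [DecidableEq κ] (key : α → κ) :
    ∀ (ks : List κ) (l : List α), ks.Nodup → (∀ t ∈ l, key t ∈ ks) →
    (ks.flatMap (fun d => l.filter (fun t => key t == d))).Perm l := by
  intro ks
  induction ks with
  | nil =>
    intro l _ hm
    cases l with
    | nil => exact List.Perm.refl _
    | cons t l => exact absurd (hm t (by simp)) (by simp)
  | cons d ks ih =>
    intro l hnd hm
    rw [List.flatMap_cons, ← pv_shrink key l d ks (List.nodup_cons.mp hnd).1]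
    have hm' : ∀ t ∈ l.filter (fun t => !(key t == d)), key t ∈ ks := by
      intro t ht
      rcases List.mem_filter.mp ht with ⟨htl, hkey⟩
      have := hm t htl
      simp only [List.mem_cons] at this
      rcases this with h | h
      · exfalso; rw [h] at hkey; simp at hkey
      · exact h
    exact ((ih (l.filter (fun t => !(key t == d))) (List.nodup_cons.mp hnd).2 hm').append_left _).trans
      (List.filter_append_perm _ l)

-- well-formedness of all deduplicated split reports, extracted from Pre_
lemma pv_wf (id_list report : List String) (k : Int) (hPre : Pre_solution id_list report k) :
    ∀ t ∈ pvPairsT report, ∃ a b, t = [a, b] ∧ b ∈ id_list ∧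
      (k ≤ pvNumRep report b → a ∈ id_list) := by
  intro t ht
  rw [pvPairsT, PySem.List.mem_dedup] at ht
  obtain ⟨r, hr, rfl⟩ := List.mem_map.mp ht
  obtain ⟨hlen, hb, ha⟩ := hPre r hr
  rcases hsp : PySem.Str.split₀ r with _ | ⟨a, _ | ⟨b, _ | ⟨c, tl⟩⟩⟩ <;>
    rw [hsp] at hlen <;> simp at hlen
  rw [hsp] at hb ha
  exact ⟨a, b, rfl, by simpa using hb, by simpa using ha⟩

lemma pv_pvG_some (d : String) (t : List String) (a : String) :
    pvG d t = some a ↔ t = [a, d] := by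
  rcases t with _ | ⟨x, _ | ⟨b, _ | ⟨c, tl⟩⟩⟩ <;> simp [pvG]
  by_cases hbd : b = d <;> simp [hbd]

lemma pv_mem_SA (report : List String) (d j : String) :
    j ∈ pvSA report d ↔ [j, d] ∈ pvPairsT report := by
  rw [pvSA, PySem.Set.mem_ofList, pvReps, List.mem_filterMap, pvPairsT, PySem.List.mem_dedup]
  constructor
  · rintro ⟨t, ht, hg⟩; rwa [(pv_pvG_some d t j).mp hg] at ht
  · intro h; exact ⟨[j, d], h, (pv_pvG_some d [j, d] j).mpr rfl⟩

lemma pv_nodup_SA (report : List String) (d : String) : (pvSA report d).Nodup :=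
  PySem.Set.nodup_ofList _

lemma pv_nodup_Fd (report : List String) (d : String) : (pvFd report d).Nodup :=
  (PySem.List.nodup_dedup _).filter _

lemma pv_Fd_len (id_list report : List String) (k : Int) (hPre : Pre_solution id_list report k)
    (d : String) : (pvFd report d).length = (pvSA report d).length := by
  have hperm : (pvFd report d).Perm ((pvSA report d).map (fun a => [a, d])) := by
    rw [List.perm_ext_iff_of_nodup (pv_nodup_Fd report d)
      (List.Nodup.map (fun a b hab => by simpa using hab) (pv_nodup_SA report d))]
    intro t
    rw [pvFd, List.mem_filter, List.mem_map]
    constructor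
    · rintro ⟨ht, hkey⟩
      obtain ⟨a, b, rfl, -, -⟩ := pv_wf id_list report k hPre t ht
      have hbd : b = d := by simpa using hkey
      subst hbd
      exact ⟨a, (pv_mem_SA report b a).mpr ht, rfl⟩
    · rintro ⟨a, ha, rfl⟩
      exact ⟨(pv_mem_SA report d a).mp ha, by simp⟩
  simpa using hperm.length_eq

-- B's count dict, in closed form
def pvCnt (id_list report : List String) : PySem.Dict String Int :=
  ((pvPairsT report).filterMap pvSndOpt).foldl (fun cnt b => cnt.modify b 0 (· + 1))
    (id_list.foldl (fun (d : PySem.Dict String Int) i => d.insert i 0) PySem.Dict.empty)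

lemma pv_cnt_getD (id_list report : List String) (k : Int) (hPre : Pre_solution id_list report k)
    (d : String) : (pvCnt id_list report).getD d 0 = ((pvFd report d).length : Int) := by
  rw [pvCnt, PySem.Dict.getD_foldl_modify_add_one,
    pv_getD_fold_insert_zero _ _ _ (PySem.Dict.getD_empty _ _), zero_add,
    List.count_eq_countP, List.countP_filterMap]
  rw [pvFd, ← List.countP_eq_length_filter]
  congr 1
  refine List.countP_congr (fun t ht => ?_)
  obtain ⟨a, b, rfl, -, -⟩ := pv_wf id_list report k hPre t ht
  simp [pvSndOpt]

lemma pv_pointwise (id_list report : List String) (k : Int) (hPre : Pre_solution id_list report k)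
    (j d : String) :
    List.countP (fun t => pvFB k (pvCnt id_list report) t == some j) (pvFd report d)
      = if k ≤ ((pvSA report d).length : Int) then (pvSA report d).count j else 0 := by
  have hcnt : ∀ b, (pvCnt id_list report).getD b 0 = ((pvFd report b).length : Int) :=
    pv_cnt_getD id_list report k hPre
  have hshape : ∀ t ∈ pvFd report d, ∃ a, t = [a, d] ∧ [a, d] ∈ pvPairsT report := by
    intro t ht
    rcases List.mem_filter.mp ht with ⟨htp, hkey⟩
    obtain ⟨a, b, rfl, -, -⟩ := pv_wf id_list report k hPre t htp
    have hbd : b = d := by simpa using hkey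
    subst hbd
    exact ⟨a, rfl, htp⟩
  by_cases hk : k ≤ ((pvSA report d).length : Int)
  · rw [if_pos hk]
    have hcond : k ≤ (pvCnt id_list report).getD d 0 := by
      rw [hcnt d, pv_Fd_len id_list report k hPre d]; exact hk
    have : List.countP (fun t => pvFB k (pvCnt id_list report) t == some j) (pvFd report d)
        = List.countP (fun t => t == [j, d]) (pvFd report d) := by
      refine List.countP_congr (fun t ht => ?_)
      obtain ⟨a, rfl, -⟩ := hshape t ht
      have : pvFB k (pvCnt id_list report) [a, d] = some a := by
        simp only [pvFB]; rw [if_pos hcond]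
      rw [this]
      simp
    rw [this, ← List.count_eq_countP]
    by_cases hmem : [j, d] ∈ pvFd report d
    · rw [List.count_eq_one_of_mem (pv_nodup_Fd report d) hmem]
      have hj : j ∈ pvSA report d :=
        (pv_mem_SA report d j).mpr (List.mem_filter.mp hmem).1
      rw [List.count_eq_one_of_mem (pv_nodup_SA report d) hj]
    · rw [List.count_eq_zero_of_not_mem hmem]
      have hj : j ∉ pvSA report d := by
        intro hj
        exact hmem (List.mem_filter.mpr ⟨(pv_mem_SA report d j).mp hj, by simp⟩)
      rw [List.count_eq_zero_of_not_mem hj]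
  · rw [if_neg hk]
    rw [List.countP_eq_zero]
    intro t ht
    obtain ⟨a, rfl, -⟩ := hshape t ht
    have hcond : ¬ k ≤ (pvCnt id_list report).getD d 0 := by
      rw [hcnt d, pv_Fd_len id_list report k hPre d]; exact hk
    have : pvFB k (pvCnt id_list report) [a, d] = none := by
      simp only [pvFB]; rw [if_neg hcond]
    simp [this]

-- the central count identity: A's increment events and B's agree at every id
lemma pv_counts (id_list report : List String) (k : Int) (hPre : Pre_solution id_list report k)
    (j : String) :
    (((PySem.List.dedup id_list).filter
        (fun d => decide (k ≤ ((pvSA report d).length : Int)))).flatMap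
      (fun d => pvSA report d)).count j
    = ((pvPairsT report).filterMap (pvFB k (pvCnt id_list report))).count j := by
  have hmem : ∀ t ∈ pvPairsT report, (t.getD 1 "") ∈ PySem.List.dedup id_list := by
    intro t ht
    obtain ⟨a, b, rfl, hb, -⟩ := pv_wf id_list report k hPre t ht
    rw [PySem.List.mem_dedup]
    simpa using hb
  have hperm := pv_perm_group (fun t : List String => t.getD 1 "")
    (PySem.List.dedup id_list) (pvPairsT report) (PySem.List.nodup_dedup _) hmem
  conv_rhs => rw [List.count_eq_countP, List.countP_filterMap]
  rw [← hperm.countP_eq, pv_countP_flatMap]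
  rw [pv_count_flatMap, pv_sum_map_filter]
  congr 1
  refine List.map_congr_left (fun d _ => ?_)
  have hpt := pv_pointwise id_list report k hPre j d
  have : List.countP (fun t => (Option.map (fun x => x == j) (pvFB k (pvCnt id_list report) t)).getD false)
      ((pvPairsT report).filter (fun t => t.getD 1 "" == d))
      = List.countP (fun t => pvFB k (pvCnt id_list report) t == some j) (pvFd report d) := by
    rw [pvFd]
    refine List.countP_congr (fun t _ => ?_)
    cases h : pvFB k (pvCnt id_list report) t <;> simp
  rw [this, hpt]
  by_cases hk : k ≤ ((pvSA report d).length : Int) <;> simp [hk]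

lemma pv_numRep_eq (report : List String) (b : String) :
    pvNumRep report b = ((pvFd report b).length : Int) := rfl

lemma pv_len_set (s : PySem.Set String) : PySem.Set.len s = (s.length : Int) := by
  simp [PySem.Set.len]

-- ===== VERDICT (by name: the statement is the Claim_ definition above) =====
theorem solution_spec : Claim_equal_solution := by
  intro id_list report k _ hPre
  unfold Spec_solution solution solution_alt
  simp only []
  have hwf := pv_wf id_list report k hPre
  -- the two initial dicts of A's first loop
  have hst : id_list.foldl
      (fun (st : PySem.Dict String (PySem.Set String) × PySem.Dict String Int) i =>
        (st.1.insert i PySem.Set.empty, st.2.insert i 0))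
      (PySem.Dict.empty, PySem.Dict.empty)
      = (id_list.foldl (fun d i => d.insert i PySem.Set.empty) PySem.Dict.empty,
         id_list.foldl (fun d i => d.insert i 0) PySem.Dict.empty) :=
    PySem.List.foldl_prod_mk
      (f := fun (d : PySem.Dict String (PySem.Set String)) i => d.insert i PySem.Set.empty)
      (g := fun (d : PySem.Dict String Int) i => d.insert i 0) id_list _ _
  rw [hst]
  -- A's dic after the report loop: keys and values
  have hdicA : ∀ d, (report.foldl (fun dic r =>
      match PySem.Str.split₀ r with
      | [reporter, reported] => dic.modify reported PySem.Set.empty (fun s => s.add reporter)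
      | _ => dic) (id_list.foldl (fun d i => d.insert i PySem.Set.empty) PySem.Dict.empty)).getD d PySem.Set.empty
      = pvSA report d := by
    intro d
    rw [pv_dic_getD, pv_getD_fold_insert_empty _ _ _ (PySem.Dict.getD_empty _ _)]
    exact (PySem.Set.update_nil_left (pvReps report d)).trans rfl
  have hkeysA : (report.foldl (fun dic r =>
      match PySem.Str.split₀ r with
      | [reporter, reported] => dic.modify reported PySem.Set.empty (fun s => s.add reporter)
      | _ => dic) (id_list.foldl (fun d i => d.insert i PySem.Set.empty) PySem.Dict.empty)).keys
      = PySem.List.dedup id_list := by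
    rw [pv_keys_fold_stepA]
    · exact pv_keys_fold_insert id_list _
    · intro r hr
      obtain ⟨hlen, hb, -⟩ := hPre r hr
      rcases hsp : PySem.Str.split₀ r with _ | ⟨a, _ | ⟨b, _ | ⟨c, tl⟩⟩⟩ <;>
        rw [hsp] at hlen <;> simp at hlen
      rw [hsp] at hb
      refine ⟨a, b, rfl, ?_⟩
      rw [pv_keys_fold_insert id_list _, PySem.List.mem_dedup]
      simpa using hb
  simp only [hdicA, hkeysA, pv_len_set]
  -- A's third loop as one flat fold over increment events
  rw [pv_fold_if_flat (L := fun d => pvSA report d)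
    (P := fun d => k ≤ ((pvSA report d).length : Int))
    (f := fun (email : PySem.Dict String Int) i => email.modify i 0 (· + 1))]
  -- B: the deduplicated pairs and the count dict
  rw [← PySem.List.dedup_eq_ofList (report.map PySem.Str.split₀)]
  rw [show PySem.List.dedup (report.map PySem.Str.split₀) = pvPairsT report from rfl]
  rw [pv_cnt_fold_eq, pv_email_fold_eq]
  rw [show ((pvPairsT report).filterMap pvSndOpt).foldl (fun cnt b => cnt.modify b 0 (· + 1))
      (id_list.foldl (fun (d : PySem.Dict String Int) i => d.insert i 0) PySem.Dict.empty)
      = pvCnt id_list report from rfl]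
  -- names for the two increment-event lists
  set incA := (((PySem.List.dedup id_list).filter
      (fun d => decide (k ≤ ((pvSA report d).length : Int)))).flatMap
      (fun d => pvSA report d)) with hincA
  set incB := (pvPairsT report).filterMap (pvFB k (pvCnt id_list report)) with hincB
  -- both increment lists only touch ids of id_list
  have hsubA : ∀ x ∈ incA, x ∈ PySem.List.dedup id_list := by
    intro x hx
    rw [hincA] at hx
    obtain ⟨d, hd, hxd⟩ := List.mem_flatMap.mp hx
    rcases List.mem_filter.mp hd with ⟨-, hdec⟩
    have hpair : [x, d] ∈ pvPairsT report := (pv_mem_SA report d x).mp hxd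
    obtain ⟨a, b, heq, hb, ha⟩ := hwf [x, d] hpair
    obtain ⟨rfl, rfl⟩ : x = a ∧ d = b := by simpa using heq
    rw [PySem.List.mem_dedup]
    apply ha
    rw [pv_numRep_eq, pv_Fd_len id_list report k hPre d]
    exact of_decide_eq_true hdec
  have hsubB : ∀ x ∈ incB, x ∈ PySem.List.dedup id_list := by
    intro x hx
    rw [hincB] at hx
    obtain ⟨t, ht, hfb⟩ := List.mem_filterMap.mp hx
    obtain ⟨a, b, rfl, hb, ha⟩ := hwf t ht
    have hcond : k ≤ (pvCnt id_list report).getD b 0 ∧ a = x := by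
      by_cases hc : k ≤ (pvCnt id_list report).getD b 0
      · refine ⟨hc, ?_⟩
        simp only [pvFB, if_pos hc] at hfb
        simpa using hfb
      · simp only [pvFB, if_neg hc] at hfb
        exact absurd hfb (by simp)
    obtain ⟨hc, rfl⟩ := hcond
    rw [PySem.List.mem_dedup]
    apply ha
    rw [pv_numRep_eq, ← pv_cnt_getD id_list report k hPre b]
    exact hc
  -- final values of both email dicts
  have hAget : ∀ j, (incA.foldl (fun e i => e.modify i 0 (· + 1))
      (id_list.foldl (fun (d : PySem.Dict String Int) i => d.insert i 0) PySem.Dict.empty)).getD j 0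
      = (incA.count j : Int) := by
    intro j
    rw [PySem.Dict.getD_foldl_modify_add_one,
      pv_getD_fold_insert_zero _ _ _ (PySem.Dict.getD_empty _ _), zero_add]
  have hBget : ∀ j, (incB.foldl (fun e a => e.modify a 0 (· + 1))
      (id_list.foldl (fun (d : PySem.Dict String Int) i => d.insert i 0) PySem.Dict.empty)).getD j 0
      = (incB.count j : Int) := by
    intro j
    rw [PySem.Dict.getD_foldl_modify_add_one,
      pv_getD_fold_insert_zero _ _ _ (PySem.Dict.getD_empty _ _), zero_add]
  have hAkeys : (incA.foldl (fun e i => e.modify i 0 (· + 1))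
      (id_list.foldl (fun (d : PySem.Dict String Int) i => d.insert i 0) PySem.Dict.empty)).keys
      = PySem.List.dedup id_list := by
    rw [pv_keys_fold_modify_one, pv_keys_fold_insert, pv_update_subset _ _ hsubA]
  have hBkeys : (incB.foldl (fun e a => e.modify a 0 (· + 1))
      (id_list.foldl (fun (d : PySem.Dict String Int) i => d.insert i 0) PySem.Dict.empty)).keys
      = PySem.List.dedup id_list := by
    rw [pv_keys_fold_modify_one, pv_keys_fold_insert, pv_update_subset _ _ hsubB]
  -- A's answer loop is a map over the keys; B returns the values, also a map over the keys
  rw [PySem.List.foldl_append_singleton_eq_map, List.nil_append]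
  rw [PySem.Dict.values_eq_map_keys _ (hBkeys ▸ PySem.List.nodup_dedup id_list) 0]
  rw [hAkeys, hBkeys]
  refine List.map_congr_left (fun j _ => ?_)
  rw [hAget, hBget, hincA, hincB]
  exact_mod_cast pv_counts id_list report k hPre j
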